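-- pv_equiv track=rewrite | github.com/Curlykonda/Thesis-NewsRec-TempUserRep | preprocessing/get_dpg_data_sample.py | update_logging_dates
-- ===== SOURCE A (Python) =====
-- def update_logging_dates(articles_read, logging_dates):
--     first, last = logging_dates
--
--     for _, art_id, time_stamp in articles_read:
--         # entry[0] = news_paper
--         # entry[1] = article_id
--         # entry[2] = time_stamp
--         if first is None or last is None:
--             first = last = time_stamp
--
--         if time_stamp < first:
--             first = time_stamp
--         if time_stamp > last:
--             last = time_stamp
--
--     return (first, last)
-- ===== SOURCE B (Python) =====
-- def update_logging_dates(articles_read, logging_dates):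
--     timestamps = [ts for _, _, ts in articles_read]
--     first, last = logging_dates
--     if not timestamps:
--         return (first, last)
--     if first is None or last is None:
--         return (min(timestamps), max(timestamps))
--     return (min(first, min(timestamps)), max(last, max(timestamps)))
-- ===== Notes on version B (the rewrite author's own statement) =====
-- stated objective: simpler
-- what changed: Replaces the fused tracking loop (per-iteration None reset plus in-loop min/max updates) by an explicit three-case decomposition over the extracted timestamp list with separate min/max reductions.
import Mathlib
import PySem

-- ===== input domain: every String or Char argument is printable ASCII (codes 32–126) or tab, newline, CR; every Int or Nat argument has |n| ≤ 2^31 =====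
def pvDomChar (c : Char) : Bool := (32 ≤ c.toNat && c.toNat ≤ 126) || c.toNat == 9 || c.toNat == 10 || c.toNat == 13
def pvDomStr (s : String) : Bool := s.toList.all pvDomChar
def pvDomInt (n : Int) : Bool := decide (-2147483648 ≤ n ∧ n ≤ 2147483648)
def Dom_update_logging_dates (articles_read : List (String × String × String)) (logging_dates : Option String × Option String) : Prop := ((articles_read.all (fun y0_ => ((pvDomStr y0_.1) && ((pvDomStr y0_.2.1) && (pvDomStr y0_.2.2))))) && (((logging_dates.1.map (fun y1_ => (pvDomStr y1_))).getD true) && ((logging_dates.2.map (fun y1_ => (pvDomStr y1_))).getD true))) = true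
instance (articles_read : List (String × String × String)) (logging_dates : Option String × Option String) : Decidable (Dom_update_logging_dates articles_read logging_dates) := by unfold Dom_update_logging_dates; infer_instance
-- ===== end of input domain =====

-- B replaces A's fused tracking loop by a three-case decomposition with separate min/max reductions (objective: simpler).

-- ===== PORT A =====
-- one loop iteration of A: reset both bounds if either is None, then the two comparisons
def pvStepA (fl : Option String × Option String) (e : String × String × String) : Option String × Option String :=
  let ts := e.2.2
  let fl' := if fl.1 = none ∨ fl.2 = none then (some ts, some ts) else fl
  let f' := match fl'.1 with
    | some f => if ts < f then some ts else some f
    | none => fl'.1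
  let l' := match fl'.2 with
    | some l => if ts > l then some ts else some l
    | none => fl'.2
  (f', l')

def update_logging_dates (articles_read : List (String × String × String)) (logging_dates : Option String × Option String) : Option String × Option String :=
  articles_read.foldl pvStepA logging_dates

-- ===== PORT B =====
def update_logging_dates_alt (articles_read : List (String × String × String)) (logging_dates : Option String × Option String) : Option String × Option String :=
  let timestamps := articles_read.map (fun e => e.2.2)
  match timestamps with
  | [] => logging_dates
  | t :: rest =>
    let mn := rest.foldl min t   -- min(timestamps)
    let mx := rest.foldl max t   -- max(timestamps)
    match logging_dates with
    | (some first, some last) => (some (min first mn), some (max last mx))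
    | _ => (some mn, some mx)

-- ===== PRECONDITION & SPEC =====
def Spec_update_logging_dates (articles_read : List (String × String × String)) (logging_dates : Option String × Option String) (out : Option String × Option String) : Prop := out = update_logging_dates_alt articles_read logging_dates
instance (articles_read : List (String × String × String)) (logging_dates : Option String × Option String) (out : Option String × Option String) : Decidable (Spec_update_logging_dates articles_read logging_dates out) := by unfold Spec_update_logging_dates; infer_instance

-- ===== CLAIM (what is proved, stated in full; the proofs are below) =====
def Claim_equal_update_logging_dates : Prop := ∀ (articles_read : List (String × String × String)) (logging_dates : Option String × Option String), Dom_update_logging_dates articles_read logging_dates → Spec_update_logging_dates articles_read logging_dates (update_logging_dates articles_read logging_dates)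

-- ===== LEMMAS AND PROOFS =====

theorem pvStepA_some (f l : String) (e : String × String × String) :
    pvStepA (some f, some l) e = (some (min f e.2.2), some (max l e.2.2)) := by
  have hmin : (if e.2.2 < f then some e.2.2 else some f) = some (min f e.2.2) := by
    split_ifs with h
    · rw [min_eq_right h.le]
    · rw [min_eq_left (not_lt.mp h)]
  have hmax : (if e.2.2 > l then some e.2.2 else some l) = some (max l e.2.2) := by
    split_ifs with h
    · rw [max_eq_right h.le]
    · rw [max_eq_left (not_lt.mp h)]
  simp only [pvStepA]
  rw [if_neg (by simp : ¬(((some f : Option String), (some l : Option String)).1 = none ∨ ((some f : Option String), (some l : Option String)).2 = none))]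
  simp only [Prod.mk.injEq]
  exact ⟨hmin, hmax⟩

theorem pvFoldMin_le (l : List String) (a : String) : List.foldl min a l ≤ a := by
  induction l generalizing a with
  | nil => exact le_refl a
  | cons x l ih => exact le_trans (ih (min a x)) (min_le_left a x)

theorem pvLe_foldMax (l : List String) (a : String) : a ≤ List.foldl max a l := by
  induction l generalizing a with
  | nil => exact le_refl a
  | cons x l ih => exact le_trans (le_max_left a x) (ih (max a x))

theorem pvFoldA_some (ar : List (String × String × String)) (f l : String) :
    ar.foldl pvStepA (some f, some l)
      = (some (ar.foldl (fun a e => min a e.2.2) f),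
         some (ar.foldl (fun a e => max a e.2.2) l)) := by
  induction ar generalizing f l with
  | nil => rfl
  | cons e rest ih =>
    simp only [List.foldl_cons, pvStepA_some, ih]

theorem pvFoldMin (rest : List (String × String × String)) (a t : String) :
    List.foldl (fun a e => min a e.2.2) (min a t) rest
      = min a (List.foldl min t (rest.map (fun e => e.2.2))) := by
  induction rest generalizing t with
  | nil => rfl
  | cons e rest ih =>
    simp only [List.foldl_cons, List.map_cons]
    rw [min_assoc, ih]

theorem pvFoldMax (rest : List (String × String × String)) (a t : String) :
    List.foldl (fun a e => max a e.2.2) (max a t) rest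
      = max a (List.foldl max t (rest.map (fun e => e.2.2))) := by
  induction rest generalizing t with
  | nil => rfl
  | cons e rest ih =>
    simp only [List.foldl_cons, List.map_cons]
    rw [max_assoc, ih]

-- ===== VERDICT (by name: the statement is the Claim_ definition above) =====
theorem update_logging_dates_spec : Claim_equal_update_logging_dates := by
  intro ar ld _
  unfold Spec_update_logging_dates update_logging_dates update_logging_dates_alt
  cases ar with
  | nil => cases ld with | mk f l => rfl
  | cons e rest =>
    obtain ⟨f, l⟩ := ld
    match f, l with
    | some f, some l =>
      simp only [List.foldl_cons, List.map_cons, pvStepA_some, pvFoldA_some]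
      rw [pvFoldMin, pvFoldMax]
    | none, l =>
      have h0 : pvStepA (none, l) e = (some e.2.2, some e.2.2) := by
        cases l <;> simp [pvStepA]
      simp only [List.foldl_cons, List.map_cons, h0, pvFoldA_some]
      have h1 := pvFoldMin rest e.2.2 e.2.2
      have h2 := pvFoldMax rest e.2.2 e.2.2
      simp only [min_self] at h1
      simp only [max_self] at h2
      rw [h1, h2,
        min_eq_right (pvFoldMin_le (rest.map (fun e => e.2.2)) e.2.2),
        max_eq_right (pvLe_foldMax (rest.map (fun e => e.2.2)) e.2.2)]
    | some f, none =>
      have h0 : pvStepA (some f, none) e = (some e.2.2, some e.2.2) := by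
        simp [pvStepA]
      simp only [List.foldl_cons, List.map_cons, h0, pvFoldA_some]
      have h1 := pvFoldMin rest e.2.2 e.2.2
      have h2 := pvFoldMax rest e.2.2 e.2.2
      simp only [min_self] at h1
      simp only [max_self] at h2
      rw [h1, h2,
        min_eq_right (pvFoldMin_le (rest.map (fun e => e.2.2)) e.2.2),
        max_eq_right (pvLe_foldMax (rest.map (fun e => e.2.2)) e.2.2)]
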